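-- pv_equiv track=rewrite | github.com/Marsyus/python_practice_programs_batch_06 | isupper_alternative.py | isupper_replicate
-- ===== SOURCE A (Python) =====
-- def isupper_replicate(text):
--     upper_count = 0
--     uppercase = "ABCDEFGHIJKLMNOPQRSTUVWXYZ "
--     for i in text:
--         if i in uppercase:
--             upper_count += 1
--     if upper_count == len(text):
--         return True
--     else:
--         return False
-- ===== SOURCE B (Python) =====
-- def isupper_replicate(text):
--     return set(text) <= set("ABCDEFGHIJKLMNOPQRSTUVWXYZ ")
-- ===== Notes on version B (the rewrite author's own statement) =====
-- stated objective: simpler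
-- what changed: Replaces the per-character counting loop and the count==len comparison with a single subset test of the input's distinct characters against the allowed set.
import Mathlib
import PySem

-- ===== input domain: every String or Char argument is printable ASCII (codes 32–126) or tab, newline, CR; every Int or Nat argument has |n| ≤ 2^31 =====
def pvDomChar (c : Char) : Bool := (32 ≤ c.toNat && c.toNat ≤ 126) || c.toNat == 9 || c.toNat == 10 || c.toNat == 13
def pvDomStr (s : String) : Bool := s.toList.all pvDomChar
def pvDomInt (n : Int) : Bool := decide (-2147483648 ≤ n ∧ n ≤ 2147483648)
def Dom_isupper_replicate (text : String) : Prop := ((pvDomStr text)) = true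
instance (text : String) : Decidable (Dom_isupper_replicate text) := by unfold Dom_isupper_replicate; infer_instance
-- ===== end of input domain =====

-- B replaces A's counting loop and count==len comparison by a subset test over the distinct characters (objective: simpler).
-- ===== PORT A =====
def isupper_replicate (text : String) : Bool :=
  let uppercase : String := "ABCDEFGHIJKLMNOPQRSTUVWXYZ "
  let upper_count : Int :=
    text.toList.foldl (fun c i => if uppercase.toList.contains i then c + 1 else c) 0
  if upper_count = PySem.Str.len text then true else false

-- ===== PORT B =====
def isupper_replicate_alt (text : String) : Bool :=
  PySem.Set.issubset (PySem.Set.ofList text.toList)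
    (PySem.Set.ofList "ABCDEFGHIJKLMNOPQRSTUVWXYZ ".toList)

-- ===== PRECONDITION & SPEC =====
def Spec_isupper_replicate (text : String) (out : Bool) : Prop := out = isupper_replicate_alt text
instance (text : String) (out : Bool) : Decidable (Spec_isupper_replicate text out) := by unfold Spec_isupper_replicate; infer_instance

-- ===== CLAIM (what is proved, stated in full; the proofs are below) =====
def Claim_equal_isupper_replicate : Prop := ∀ (text : String), Dom_isupper_replicate text → Spec_isupper_replicate text (isupper_replicate text)

-- ===== LEMMAS AND PROOFS =====
lemma foldl_count (p : Char → Bool) (l : List Char) (a : Int) :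
    l.foldl (fun c i => if p i then c + 1 else c) a = a + l.countP p := by
  induction l generalizing a with
  | nil => simp
  | cons x xs ih =>
    simp only [List.foldl_cons, List.countP_cons, ih]
    split_ifs <;> push_cast <;> ring

lemma countP_eq_len_iff (p : Char → Bool) (l : List Char) :
    ((l.countP p : Nat) : Int) = l.length ↔ l.all p := by
  rw [List.all_eq_true]
  constructor
  · intro h
    have h' : l.countP p = l.length := by exact_mod_cast h
    intro x hx; exact List.countP_eq_length.mp h' x hx
  · intro h
    have h' : l.countP p = l.length := List.countP_eq_length.mpr fun x hx => h x hx
    exact_mod_cast h'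

lemma issubset_ofList (l t : List Char) :
    PySem.Set.issubset (PySem.Set.ofList l) t = l.all (fun c => t.contains c) := by
  have hb : ∀ (a b : Bool), (a = true ↔ b = true) → a = b := by decide
  apply hb
  simp only [PySem.Set.issubset, PySem.Set.contains, List.all_eq_true, List.contains_eq_mem,
    decide_eq_true_eq]
  constructor
  · intro h x hx; exact h x ((PySem.Set.mem_ofList _ _).mpr hx)
  · intro h x hx; exact h x ((PySem.Set.mem_ofList _ _).mp hx)

-- ===== VERDICT (by name: the statement is the Claim_ definition above) =====
theorem isupper_replicate_spec : Claim_equal_isupper_replicate := by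
  intro text _
  unfold Spec_isupper_replicate isupper_replicate isupper_replicate_alt
  rw [issubset_ofList]
  simp only [foldl_count, PySem.Str.len_eq, zero_add]
  have hfun : (fun c => List.contains (PySem.Set.ofList "ABCDEFGHIJKLMNOPQRSTUVWXYZ ".toList) c)
      = (fun c => ("ABCDEFGHIJKLMNOPQRSTUVWXYZ ".toList).contains c) := by
    funext c
    simp only [List.contains_eq_mem, decide_eq_decide]
    exact PySem.Set.mem_ofList _ c
  rw [hfun]
  by_cases h : ((text.toList.countP fun i => "ABCDEFGHIJKLMNOPQRSTUVWXYZ ".toList.contains i : Nat) : Int) = text.toList.length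
  · rw [if_pos h]
    exact ((countP_eq_len_iff _ _).mp h).symm
  · have hn : ¬ text.toList.all (fun c => "ABCDEFGHIJKLMNOPQRSTUVWXYZ ".toList.contains c) = true :=
      fun ha => h ((countP_eq_len_iff _ _).mpr ha)
    rw [if_neg h]
    exact (Bool.eq_false_iff.mpr hn).symm
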